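-- pv_equiv track=rewrite | github.com/sooulaway/test_task_python | task4/task4.py | clear_str
-- ===== SOURCE A (Python) =====
-- def clear_str(_str):
--     new_str = ''
--     for i, sign in enumerate(_str):
--         if sign != '*':
--             new_str += sign
--         else:
--             if i > 0:
--                 if _str[i - 1] != '*':
--                     new_str += '.' + sign
--             else:
--                 new_str += '.' + sign
--     return new_str
-- ===== SOURCE B (Python) =====
-- def clear_str(_str):
--     parts = _str.split('*')
--     if len(parts) == 1:
--         return _str
--     first, *mid, last = parts
--     return '.*'.join([first] + [p for p in mid if p] + [last])
-- ===== Notes on version B (the rewrite author's own statement) =====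
-- stated objective: idiomatic
-- what changed: B recasts the task as staged standard-library passes -- split the string on the star separator, filter out the empty middle pieces that consecutive separators produce, and join the pieces with the two-character replacement -- instead of A's per-character loop that inspects the previous input character and grows the result by repeated string concatenation.
import Mathlib
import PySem

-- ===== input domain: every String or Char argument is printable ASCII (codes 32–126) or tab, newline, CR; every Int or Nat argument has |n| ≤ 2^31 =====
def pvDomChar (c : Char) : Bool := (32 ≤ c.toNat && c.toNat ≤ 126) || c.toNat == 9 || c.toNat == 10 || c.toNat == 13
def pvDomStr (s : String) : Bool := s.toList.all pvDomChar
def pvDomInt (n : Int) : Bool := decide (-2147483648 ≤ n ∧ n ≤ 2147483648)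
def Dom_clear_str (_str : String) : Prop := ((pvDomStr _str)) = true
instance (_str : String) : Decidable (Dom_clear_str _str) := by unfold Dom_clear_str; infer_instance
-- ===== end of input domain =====

-- B restates the task as staged library passes — split on '*', filter empty middle pieces,
-- join with '.*' — instead of A's per-character loop; objective: idiomatic.

-- ===== PORT A =====
-- the loop body of A: per (index, char), append to the accumulated characters
def clearStrBody (cs : List Char) (acc : List Char) (p : Int × Char) : List Char :=
  if p.2 ≠ '*' then acc ++ [p.2]
  else if p.1 > 0 then
    (if PySem.List.pyGet? cs (p.1 - 1) ≠ some '*' then acc ++ ['.', p.2] else acc)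
  else acc ++ ['.', p.2]

def clear_str (_str : String) : String :=
  let cs := _str.toList
  String.ofList ((PySem.List.enumerate cs 0).foldl (clearStrBody cs) [])

-- ===== PORT B =====
-- parts = _str.split('*'); if len(parts)==1: return _str; first, *mid, last = parts;
-- return '.*'.join([first] + [p for p in mid if p] + [last])
def clear_str_alt (_str : String) : String :=
  let parts := PySem.Chars.splitOn _str.toList ['*']
  if parts.length = 1 then _str
  else
    match parts with
    | [] => _str    -- unreachable: split never returns an empty list
    | p0 :: t =>
      String.ofList (PySem.Chars.join ['.', '*']
        (p0 :: (t.dropLast.filter (· ≠ []) ++ [(t.getLast?).getD []])))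

-- ===== PRECONDITION & SPEC =====
def Spec_clear_str (_str : String) (out : String) : Prop := out = clear_str_alt _str
instance (_str : String) (out : String) : Decidable (Spec_clear_str _str out) := by unfold Spec_clear_str; infer_instance

-- ===== CLAIM =====
def Claim_equal_clear_str : Prop := ∀ (_str : String), Dom_clear_str _str → Spec_clear_str _str (clear_str _str)

-- ===== LEMMAS AND PROOFS =====

-- canonical middle form: recursion carrying "previous char was '*'"
def starGo (prev : Bool) : List Char → List Char
  | [] => []
  | c :: rest =>
    if c = '*' then
      (if prev then starGo true rest else '.' :: '*' :: starGo true rest)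
    else c :: starGo false rest

-- A's fold over the enumerated suffix computes starGo of the "previous char is '*'" flag
lemma foldA (cs : List Char) (rest : List Char) (k : Nat) (acc : List Char)
    (hdrop : cs.drop k = rest) :
    (PySem.List.enumerate rest (k : Int)).foldl (clearStrBody cs) acc
      = acc ++ starGo (decide (0 < k ∧ cs[k - 1]? = some '*')) rest := by
  induction rest generalizing k acc with
  | nil => simp [PySem.List.enumerate_nil, starGo]
  | cons c tail ih =>
    have hk : cs[k]? = some c := by
      have : (cs.drop k)[0]? = some c := by rw [hdrop]; rfl
      simpa using this
    have hdrop' : cs.drop (k + 1) = tail := by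
      have : cs.drop (k + 1) = (cs.drop k).drop 1 := by
        rw [List.drop_drop]
      rw [this, hdrop]; rfl
    have hcast : (k : Int) + 1 = ((k + 1 : Nat) : Int) := by push_cast; ring
    rw [PySem.List.enumerate_cons, List.foldl_cons, hcast, ih _ _ hdrop']
    by_cases hc : c = '*'
    · subst hc
      have hnext : (decide (0 < k + 1 ∧ cs[k + 1 - 1]? = some '*')) = true := by
        simp [hk]
      rw [hnext]
      by_cases hk0 : 0 < k
      · have hKm1 : PySem.List.pyGet? cs ((k : Int) - 1) = cs[k - 1]? := by
          have : (k : Int) - 1 = ((k - 1 : Nat) : Int) := by omega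
          rw [this, PySem.List.pyGet?_natCast]
        by_cases hp : cs[k - 1]? = some '*'
        · have hprev : (decide (0 < k ∧ cs[k - 1]? = some '*')) = true := by simp [hk0, hp]
          rw [hprev]
          simp [clearStrBody, hk0, hKm1, hp, starGo]
        · have hprev : (decide (0 < k ∧ cs[k - 1]? = some '*')) = false := by simp [hp]
          rw [hprev]
          simp [clearStrBody, hk0, hKm1, hp, starGo]
      · have hkz : k = 0 := by omega
        subst hkz
        simp [clearStrBody, starGo]
    · have hnext : (decide (0 < k + 1 ∧ cs[k + 1 - 1]? = some '*')) = false := by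
        simp [hk, hc]
      rw [hnext]
      simp [clearStrBody, hc, starGo]

-- PySem's fuel-based split with separator "*" is Mathlib's List.splitOn '*'
lemma goSplit (fuel : Nat) (l cur : List Char) (acc : List (List Char)) (h : l.length ≤ fuel) :
    PySem.Chars.splitOn.go ['*'] fuel l cur acc
      = acc.reverse ++ List.modifyHead (cur.reverse ++ ·) (List.splitOnP (· == '*') l) := by
  induction fuel generalizing l cur acc with
  | zero =>
    have : l = [] := by cases l <;> simp_all
    subst this
    rw [PySem.Chars.splitOn.go.eq_def]
    simp [List.splitOnP_nil]
  | succ fuel ih =>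
    cases l with
    | nil =>
      rw [PySem.Chars.splitOn.go.eq_def]
      simp [List.splitOnP_nil]
    | cons c rest =>
      by_cases hc : c = '*'
      · subst hc
        have hpre : List.isPrefixOf ['*'] ('*' :: rest) = true := by simp [List.isPrefixOf]
        rw [PySem.Chars.splitOn.go.eq_def]
        simp only [hpre, if_true]
        have hd : List.drop (['*'] : List Char).length ('*' :: rest) = rest := by simp
        rw [hd, ih rest [] (cur.reverse :: acc) (by simpa using Nat.le_of_succ_le_succ h)]
        rw [List.splitOnP_cons]
        simp
        cases List.splitOnP (fun x => x == '*') rest <;> simp [List.modifyHead]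
      · have hpre : List.isPrefixOf ['*'] (c :: rest) = false := by
          simp [List.isPrefixOf]
          exact fun hh => absurd hh.symm hc
        rw [PySem.Chars.splitOn.go.eq_def]
        simp only [hpre, Bool.false_eq_true, if_false]
        rw [ih rest (c :: cur) acc (by simpa using Nat.le_of_succ_le_succ h)]
        have hne := List.splitOnP_ne_nil (fun x => x == '*') rest
        obtain ⟨h0, t0, hsp⟩ : ∃ h0 t0, List.splitOnP (fun x => x == '*') rest = h0 :: t0 := by
          cases hx : List.splitOnP (fun x => x == '*') rest with
          | nil => exact absurd hx hne
          | cons a b => exact ⟨a, b, rfl⟩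
        simp [List.splitOnP_cons, hc, hsp]

lemma splitOn_eq (cs : List Char) :
    PySem.Chars.splitOn cs ['*'] = List.splitOn '*' cs := by
  rw [PySem.Chars.splitOn, goSplit (cs.length + 1) cs [] [] (by omega)]
  unfold List.splitOn
  cases h : List.splitOnP (fun x => x == '*') cs <;> simp [List.modifyHead]

lemma splitOn_nostar (cs : List Char) (h : '*' ∉ cs) : List.splitOn '*' cs = [cs] := by
  induction cs with
  | nil => simp [List.splitOn, List.splitOnP_nil]
  | cons c rest ih =>
    have hc : c ≠ '*' := fun hh => h (by simp [hh])
    have hr : '*' ∉ rest := fun hh => h (by simp [hh])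
    unfold List.splitOn at ih ⊢
    rw [List.splitOnP_cons, if_neg (by simp [hc]), ih hr]
    rfl

lemma splitOn_star_long (cs : List Char) (h : '*' ∈ cs) :
    2 ≤ (List.splitOn '*' cs).length := by
  induction cs with
  | nil => simp at h
  | cons c rest ih =>
    by_cases hc : c = '*'
    · subst hc
      unfold List.splitOn
      rw [List.splitOnP_cons, if_pos (by simp)]
      cases hx : List.splitOnP (fun x => x == '*') rest with
      | nil => exact absurd hx (List.splitOnP_ne_nil _ _)
      | cons a b => simp
    · have hr : '*' ∈ rest := by
        rcases List.mem_cons.mp h with h1 | h1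
        · exact absurd h1.symm hc
        · exact h1
      have h2 := ih hr
      unfold List.splitOn at h2 ⊢
      rw [List.splitOnP_cons, if_neg (by simp [hc])]
      cases hx : List.splitOnP (fun x => x == '*') rest with
      | nil => exact absurd hx (List.splitOnP_ne_nil _ _)
      | cons a b =>
        rw [hx] at h2
        simpa using h2

lemma starGo_false_nostar (cs : List Char) (h : '*' ∉ cs) : starGo false cs = cs := by
  induction cs with
  | nil => rfl
  | cons c rest ih =>
    have hc : c ≠ '*' := fun hh => h (by simp [hh])
    have hr : '*' ∉ rest := fun hh => h (by simp [hh])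
    simp [starGo, hc, ih hr]

-- join '.*' over a cons
lemma join_cons (a : List Char) (xs : List (List Char)) :
    PySem.Chars.join ['.', '*'] (a :: xs)
      = a ++ if xs = [] then [] else ['.', '*'] ++ PySem.Chars.join ['.', '*'] xs := by
  cases xs <;> simp [PySem.Chars.join, List.intercalate, List.intersperse]

-- the joint induction: B's split/filter/join equals starGo, in both "previous char" states
lemma main_ind : ∀ (n : Nat) (cs : List Char), cs.length ≤ n →
    (∀ p0 t, List.splitOn '*' cs = p0 :: t → t ≠ [] →
       PySem.Chars.join ['.', '*'] (p0 :: (t.dropLast.filter (· ≠ []) ++ [(t.getLast?).getD []]))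
         = starGo false cs)
    ∧ PySem.Chars.join ['.', '*']
        ((List.splitOn '*' cs).dropLast.filter (· ≠ []) ++ [((List.splitOn '*' cs).getLast?).getD []])
        = starGo true cs := by
  intro n
  induction n with
  | zero =>
    intro cs hlen
    have : cs = [] := by cases cs <;> simp_all
    subst this
    constructor
    · intro p0 t hsp ht
      rw [splitOn_nostar [] (by simp)] at hsp
      cases hsp; simp_all
    · rw [splitOn_nostar [] (by simp)]
      simp [starGo, PySem.Chars.join, List.intercalate, List.intersperse]
  | succ n ih =>
    intro cs hlen
    cases cs with
    | nil =>
      constructor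
      · intro p0 t hsp ht
        rw [splitOn_nostar [] (by simp)] at hsp
        cases hsp; simp_all
      · rw [splitOn_nostar [] (by simp)]
        simp [starGo, PySem.Chars.join, List.intercalate, List.intersperse]
    | cons c rest =>
      have hrest : rest.length ≤ n := by simpa using Nat.le_of_succ_le_succ hlen
      obtain ⟨IH1, IH2⟩ := ih rest hrest
      by_cases hc : c = '*'
      · subst hc
        obtain ⟨q0, q, hq⟩ : ∃ q0 q, List.splitOn '*' rest = q0 :: q := by
          cases hx : List.splitOn '*' rest with
          | nil => exact absurd hx (List.splitOnP_ne_nil _ _)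
          | cons a b => exact ⟨a, b, rfl⟩
        have hsp : List.splitOn '*' ('*' :: rest) = [] :: q0 :: q := by
          unfold List.splitOn at hq ⊢
          rw [List.splitOnP_cons, if_pos (by simp), hq]
        rw [hq] at IH2
        constructor
        · intro p0 t hsp' ht
          rw [hsp] at hsp'
          cases hsp'
          rw [join_cons, if_neg (by simp)]
          rw [IH2]
          simp [starGo]
        · rw [hsp]
          have hfil : ((([] : List Char) :: q0 :: q).dropLast).filter (· ≠ [])
              = ((q0 :: q).dropLast).filter (· ≠ []) := by
            simp [List.dropLast]
          have hlast : ((([] : List Char) :: q0 :: q).getLast?).getD []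
              = ((q0 :: q).getLast?).getD [] := by
            simp [List.getLast?_cons_cons]
          rw [hfil, hlast, IH2]
          simp [starGo]
      · obtain ⟨h0, t0, hq⟩ : ∃ h0 t0, List.splitOn '*' rest = h0 :: t0 := by
          cases hx : List.splitOn '*' rest with
          | nil => exact absurd hx (List.splitOnP_ne_nil _ _)
          | cons a b => exact ⟨a, b, rfl⟩
        have hsp : List.splitOn '*' (c :: rest) = (c :: h0) :: t0 := by
          unfold List.splitOn at hq ⊢
          rw [List.splitOnP_cons, if_neg (by simp [hc]), hq]
          rfl
        have key : t0 ≠ [] →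
            PySem.Chars.join ['.', '*'] ((c :: h0) :: (t0.dropLast.filter (· ≠ []) ++ [(t0.getLast?).getD []]))
              = c :: starGo false rest := by
          intro ht0
          rw [join_cons, if_neg (by simp)]
          have hIH := IH1 h0 t0 hq ht0
          rw [join_cons, if_neg (by simp)] at hIH
          simp only [List.cons_append, List.append_assoc] at hIH ⊢
          rw [hIH]
        constructor
        · intro p0 t hsp' ht
          rw [hsp] at hsp'
          cases hsp'
          rw [key ht]
          simp [starGo, hc]
        · rw [hsp]
          cases t0 with
          | nil =>
            have hnostar : '*' ∉ rest := by
              by_contra hmem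
              have := splitOn_star_long rest hmem
              rw [hq] at this
              simp at this
            have hh0 : h0 = rest := by
              have := splitOn_nostar rest hnostar
              rw [hq] at this
              simpa using this
            subst hh0
            simp [starGo, hc, PySem.Chars.join, List.intercalate, List.intersperse]
            exact (starGo_false_nostar _ hnostar).symm
          | cons a b =>
            have hdl : ((c :: h0) :: a :: b).dropLast = (c :: h0) :: (a :: b).dropLast := by
              simp [List.dropLast]
            have hgl : (((c :: h0) :: a :: b).getLast?).getD [] = (((a :: b)).getLast?).getD [] := by
              simp [List.getLast?_cons_cons]
            rw [hdl, hgl]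
            have hfc : ((c :: h0) :: (a :: b).dropLast).filter (· ≠ [])
                = (c :: h0) :: ((a :: b).dropLast).filter (· ≠ []) := by
              simp
            rw [hfc, List.cons_append]
            rw [key (by simp)]
            simp [starGo, hc]

-- ===== VERDICT =====
theorem clear_str_spec : Claim_equal_clear_str := by
  intro s _
  show clear_str s = clear_str_alt s
  unfold clear_str clear_str_alt
  have hA := foldA s.toList s.toList 0 [] (by simp)
  simp only [Nat.cast_zero] at hA
  simp only [hA]
  simp only [splitOn_eq]
  by_cases hlen : (List.splitOn '*' s.toList).length = 1
  · rw [if_pos hlen]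
    have hnostar : '*' ∉ s.toList := by
      by_contra hmem
      have := splitOn_star_long s.toList hmem
      omega
    have : starGo (decide (0 < 0 ∧ s.toList[0 - 1]? = some '*')) s.toList = s.toList := by
      simpa using starGo_false_nostar s.toList hnostar
    rw [this]
    simp
  · rw [if_neg hlen]
    obtain ⟨p0, t, hq⟩ : ∃ p0 t, List.splitOn '*' s.toList = p0 :: t := by
      cases hx : List.splitOn '*' s.toList with
      | nil => exact absurd hx (List.splitOnP_ne_nil _ _)
      | cons a b => exact ⟨a, b, rfl⟩
    have ht : t ≠ [] := by
      intro h0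
      rw [hq, h0] at hlen
      simp at hlen
    rw [hq]
    have hmain := (main_ind s.toList.length s.toList (by omega)).1 p0 t hq ht
    have hflag : (decide (0 < 0 ∧ s.toList[0 - 1]? = some '*')) = false := by simp
    rw [hflag]
    simp only [List.nil_append]
    exact congrArg String.ofList hmain.symm
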